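-- pv_equiv track=rewrite | github.com/letgodchan0/Programmers | solution/부대복귀.py | solution
-- ===== SOURCE A (Python) =====
-- from collections import deque
--
-- def solution(n, roads, sources, destination):
--
--     answer = []
--     adj = [[] for _ in range(n+1)]
--     visited = [-1 for _ in range(n+1)]
--     for a,b in roads:
--         adj[a].append(b)
--         adj[b].append(a)
--
--     visited[destination] = 0
--     q = deque([destination])
--     while q:
--         cur_node = q.popleft()
--         for next_node in adj[cur_node]:
--             if visited[next_node] < 0:
--                 visited[next_node] = visited[cur_node] + 1
--                 q.append(next_node)
--
--     for s in sources:
--         answer.append(visited[s])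
--
--     return answer
-- ===== SOURCE B (Python) =====
-- def solution(n, roads, sources, destination):
--     # Bellman-Ford-style iterated edge relaxation: no adjacency list, no queue.
--     # Repeatedly sweep the raw edge list, relaxing both directions, until a
--     # whole sweep changes nothing; unit weights make the fixpoint the BFS distance.
--     dist = [-1] * (n + 1)
--     dist[destination] = 0
--     changed = True
--     while changed:
--         changed = False
--         for a, b in roads:
--             if dist[a] >= 0 and (dist[b] < 0 or dist[b] > dist[a] + 1):
--                 dist[b] = dist[a] + 1
--                 changed = True
--             if dist[b] >= 0 and (dist[a] < 0 or dist[a] > dist[b] + 1):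
--                 dist[a] = dist[b] + 1
--                 changed = True
--     return [dist[s] for s in sources]
-- ===== Notes on version B (the rewrite author's own statement) =====
-- stated objective: alternative
-- what changed: Replaces A's BFS (build an adjacency list, then expand a deque of nodes outward) by Bellman-Ford-style iterated relaxation: no adjacency structure and no queue at all, just repeated sweeps over the raw edge list relaxing both directions of each road with a min rule until a whole sweep changes nothing; with unit weights the relaxation fixpoint equals the BFS distance array.
import Mathlib
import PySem

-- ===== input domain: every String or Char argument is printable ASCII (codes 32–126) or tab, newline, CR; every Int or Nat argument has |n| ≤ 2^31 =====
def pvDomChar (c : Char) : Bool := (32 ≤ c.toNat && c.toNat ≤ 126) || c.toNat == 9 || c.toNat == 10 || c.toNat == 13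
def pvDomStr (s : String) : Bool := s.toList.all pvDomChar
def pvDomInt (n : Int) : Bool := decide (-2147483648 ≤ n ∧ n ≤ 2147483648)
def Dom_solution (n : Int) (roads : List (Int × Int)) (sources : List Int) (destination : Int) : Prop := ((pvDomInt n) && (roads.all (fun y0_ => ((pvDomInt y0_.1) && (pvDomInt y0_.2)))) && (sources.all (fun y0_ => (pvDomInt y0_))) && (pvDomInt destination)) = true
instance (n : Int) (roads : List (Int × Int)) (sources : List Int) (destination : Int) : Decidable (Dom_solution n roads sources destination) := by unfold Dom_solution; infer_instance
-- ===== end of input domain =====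

-- B replaces A's BFS (adjacency list + deque expansion) by Bellman-Ford-style iterated edge
-- relaxation to a fixpoint over the raw road list (no adjacency structure, no queue); with unit
-- weights the fixpoint equals the BFS distance array — objective: alternative, not faster.

-- ===== PORT A =====
-- Python's list index resolution: exact for -len(xs) ≤ i < len(xs) (Pre_ keeps every index in that range)
def pvIdx (m : Nat) (i : Int) : Nat := if i < 0 then (i + m).toNat else i.toNat

-- A builds the adjacency list with "adj[a].append(b); adj[b].append(a)"
def pvBuildAdj (n : Int) (roads : List (Int × Int)) : List (List Int) :=
  roads.foldl (fun adjl ab =>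
    let adjl' := adjl.modify (pvIdx adjl.length ab.1) (fun l => l ++ [ab.2])
    adjl'.modify (pvIdx adjl'.length ab.2) (fun l => l ++ [ab.1]))
    (List.replicate (n + 1).toNat [])

-- A's inner line "if visited[nb] < 0: visited[nb] = visited[cur]+1; append nb"
def pvStep (x : Int) (st : List Int × List Int) (nb : Int) : List Int × List Int :=
  if st.1.getD (pvIdx st.1.length nb) 0 < 0 then
    (st.1.set (pvIdx st.1.length nb) (st.1.getD (pvIdx st.1.length x) 0 + 1), st.2 ++ [nb])
  else st

-- A's while-loop over one deque: pop the front, appended discoveries go to the back of the same queue.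
-- fuel is a totality guard only; n.toNat + 2 never runs out (proved below for the start state).
def pvBfsA (adj : List (List Int)) : Nat → List Int → List Int → List Int
  | 0, _, v => v
  | _ + 1, [], v => v
  | f + 1, x :: rest, v =>
    let st := (adj.getD (pvIdx adj.length x) []).foldl (pvStep x) (v, rest)
    pvBfsA adj f st.2 st.1

def solution (n : Int) (roads : List (Int × Int)) (sources : List Int) (destination : Int) : List Int :=
  let adj := pvBuildAdj n roads
  let visited := (List.replicate (n + 1).toNat (-1 : Int)).set (pvIdx (n + 1).toNat destination) 0
  let res := pvBfsA adj (n.toNat + 2) [destination] visited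
  sources.foldl (fun ans s => ans ++ [res.getD (pvIdx res.length s) 0]) []

-- ===== PORT B =====
-- "if dist[u] >= 0 and (dist[w] < 0 or dist[w] > dist[u] + 1): dist[w] = dist[u] + 1; changed = True"
def pvRelax (v : List Int) (u w : Int) : List Int × Bool :=
  if 0 ≤ v.getD (pvIdx v.length u) 0 ∧
      (v.getD (pvIdx v.length w) 0 < 0 ∨
        v.getD (pvIdx v.length u) 0 + 1 < v.getD (pvIdx v.length w) 0) then
    (v.set (pvIdx v.length w) (v.getD (pvIdx v.length u) 0 + 1), true)
  else (v, false)

-- one "for a, b in roads:" sweep, relaxing both directions of every road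
def pvPass (roads : List (Int × Int)) (st : List Int × Bool) : List Int × Bool :=
  roads.foldl (fun st p =>
    let r1 := pvRelax st.1 p.1 p.2
    let c1 := st.2 || r1.2
    let r2 := pvRelax r1.1 p.2 p.1
    (r2.1, c1 || r2.2)) st

-- B's "while changed:" loop; fuel is a totality guard only, (n+1)^2+1 never runs out (proved below).
def pvBF (roads : List (Int × Int)) : Nat → List Int → List Int
  | 0, v => v
  | f + 1, v =>
    let st := pvPass roads (v, false)
    if st.2 then pvBF roads f st.1 else st.1

def solution_alt (n : Int) (roads : List (Int × Int)) (sources : List Int) (destination : Int) : List Int :=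
  let dist := (List.replicate (n + 1).toNat (-1 : Int)).set (pvIdx (n + 1).toNat destination) 0
  let res := pvBF roads ((n + 1).toNat * (n + 1).toNat + 1) dist
  sources.map (fun s => res.getD (pvIdx res.length s) 0)

-- ===== PRECONDITION & SPEC =====
-- Pre_ is exactly where Python A returns normally: n ≥ 0 and every index (road endpoints, sources,
-- destination) inside Python's valid list-index range [-(n+1), n]; outside it A raises IndexError.
def Pre_solution (n : Int) (roads : List (Int × Int)) (sources : List Int) (destination : Int) : Prop :=
  0 ≤ n ∧ (∀ p ∈ roads, -(n + 1) ≤ p.1 ∧ p.1 ≤ n ∧ -(n + 1) ≤ p.2 ∧ p.2 ≤ n) ∧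
  (∀ s ∈ sources, -(n + 1) ≤ s ∧ s ≤ n) ∧ -(n + 1) ≤ destination ∧ destination ≤ n
instance (n : Int) (roads : List (Int × Int)) (sources : List Int) (destination : Int) : Decidable (Pre_solution n roads sources destination) := by unfold Pre_solution; infer_instance

def pvWitness_solution : Int × (List (Int × Int)) × List Int × Int :=
  (5, [(1, 2), (2, 3), (3, 4), (4, 5)], [1, 3, 5], 3)

def Spec_solution (n : Int) (roads : List (Int × Int)) (sources : List Int) (destination : Int) (out : List Int) : Prop := out = solution_alt n roads sources destination
instance (n : Int) (roads : List (Int × Int)) (sources : List Int) (destination : Int) (out : List Int) : Decidable (Spec_solution n roads sources destination out) := by unfold Spec_solution; infer_instance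

-- ===== CLAIM (what is proved, stated in full; the proofs are below) =====
def Claim_equal_solution : Prop := ∀ (n : Int) (roads : List (Int × Int)) (sources : List Int) (destination : Int), Dom_solution n roads sources destination → Pre_solution n roads sources destination → Spec_solution n roads sources destination (solution n roads sources destination)

-- ===== LEMMAS AND PROOFS =====

-- ---------- generic getD/set helpers ----------
lemma pvGetD_lt_length {v : List Int} {j : Nat} (h : v.getD j 0 < 0) : j < v.length := by
  by_contra hj
  simp [List.getD_eq_getElem?_getD, List.getElem?_eq_none (by omega : v.length ≤ j)] at h

lemma pvGetD_set_self {v : List Int} {j : Nat} (a : Int) (h : j < v.length) :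
    (v.set j a).getD j 0 = a := by
  simp [List.getD_eq_getElem?_getD, List.getElem?_set_self h]

lemma pvGetD_set_ne {v : List Int} {j i : Nat} (a : Int) (h : i ≠ j) :
    (v.set j a).getD i 0 = v.getD i 0 := by
  simp [List.getD_eq_getElem?_getD, List.getElem?_set_ne (by omega : j ≠ i)]

-- ---------- the layered bridge (proof-only): deque BFS = layer-by-layer sweeps ----------
def pvSweep (adj : List (List Int)) (st : List Int × List Int) (frontier : List Int) : List Int × List Int :=
  frontier.foldl (fun st node => (adj.getD (pvIdx adj.length node) []).foldl (pvStep node) st) st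

def pvBfsB (adj : List (List Int)) : Nat → List Int → List Int → List Int
  | 0, _, v => v
  | _ + 1, [], v => v
  | f + 1, frontier, v =>
    let st := pvSweep adj (v, []) frontier
    pvBfsB adj f st.2 st.1

def pvCountNeg (v : List Int) : Nat := v.countP (fun z => decide (z < 0))

def pvInv (q v : List Int) : Prop := ∀ x ∈ q, 0 ≤ v.getD (pvIdx v.length x) 0

lemma pvStep_acc (x : Int) (l : List Int) : ∀ (v acc : List Int),
    l.foldl (pvStep x) (v, acc)
      = ((l.foldl (pvStep x) (v, [])).1, acc ++ (l.foldl (pvStep x) (v, [])).2) := by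
  induction l with
  | nil => intro v acc; simp
  | cons nb l ih =>
    intro v acc
    simp only [List.foldl_cons]
    by_cases h : v.getD (pvIdx v.length nb) 0 < 0
    · simp only [pvStep, h, if_pos, List.nil_append]
      rw [ih _ (acc ++ [nb]), ih _ [nb]]
      simp
    · simp only [pvStep, h, if_neg, not_false_iff]
      exact ih v acc

lemma pvSweep_acc (adj : List (List Int)) (q : List Int) : ∀ (v acc : List Int),
    pvSweep adj (v, acc) q
      = ((pvSweep adj (v, []) q).1, acc ++ (pvSweep adj (v, []) q).2) := by
  induction q with
  | nil => intro v acc; simp [pvSweep]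
  | cons x t ih =>
    intro v acc
    rcases hG : (adj.getD (pvIdx adj.length x) []).foldl (pvStep x) (v, []) with ⟨w, d⟩
    have h1 : pvSweep adj (v, acc) (x :: t) = pvSweep adj (w, acc ++ d) t := by
      simp only [pvSweep, List.foldl_cons]
      rw [pvStep_acc x _ v acc, hG]
    have h2 : pvSweep adj (v, []) (x :: t) = pvSweep adj (w, d) t := by
      simp only [pvSweep, List.foldl_cons]
      rw [hG]
    rw [h1, h2, ih w (acc ++ d), ih w d]
    simp

lemma pvLayers (adj : List (List Int)) (q1 : List Int) : ∀ (f : Nat) (q2 v : List Int),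
    pvBfsA adj (q1.length + f) (q1 ++ q2) v
      = pvBfsA adj f (q2 ++ (pvSweep adj (v, []) q1).2) (pvSweep adj (v, []) q1).1 := by
  induction q1 with
  | nil => intro f q2 v; simp [pvSweep]
  | cons x t ih =>
    intro f q2 v
    rcases hG : (adj.getD (pvIdx adj.length x) []).foldl (pvStep x) (v, []) with ⟨w, d⟩
    rcases hS : pvSweep adj (w, []) t with ⟨s1, s2⟩
    have hlen : (x :: t).length + f = (t.length + f) + 1 := by
      simp [Nat.add_right_comm]
    have hstep : pvBfsA adj ((x :: t).length + f) ((x :: t) ++ q2) v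
        = pvBfsA adj (t.length + f) (t ++ (q2 ++ d)) w := by
      rw [hlen]
      show pvBfsA adj (t.length + f)
          ((adj.getD (pvIdx adj.length x) []).foldl (pvStep x) (v, t ++ q2)).2
          ((adj.getD (pvIdx adj.length x) []).foldl (pvStep x) (v, t ++ q2)).1 = _
      rw [pvStep_acc x _ v (t ++ q2), hG]
      simp
    have hsw : pvSweep adj (v, []) (x :: t) = (s1, d ++ s2) := by
      have h2 : pvSweep adj (v, []) (x :: t) = pvSweep adj (w, d) t := by
        simp only [pvSweep, List.foldl_cons]
        rw [hG]
      rw [h2, pvSweep_acc adj t w d, hS]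
    rw [hstep, ih f (q2 ++ d) w, hS, hsw]
    simp

lemma pvStepFold_inv (x : Int) (l : List Int) : ∀ (v acc : List Int),
    0 ≤ v.getD (pvIdx v.length x) 0 →
    ((l.foldl (pvStep x) (v, acc)).1).length = v.length ∧
    (∀ i, 0 ≤ v.getD i 0 → ((l.foldl (pvStep x) (v, acc)).1).getD i 0 = v.getD i 0) ∧
    pvCountNeg (l.foldl (pvStep x) (v, acc)).1 + ((l.foldl (pvStep x) (v, acc)).2).length
      = pvCountNeg v + acc.length ∧
    (∀ y ∈ (l.foldl (pvStep x) (v, acc)).2,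
      y ∈ acc ∨ 0 ≤ ((l.foldl (pvStep x) (v, acc)).1).getD (pvIdx v.length y) 0) := by
  induction l with
  | nil => intro v acc _; exact ⟨rfl, fun i _ => rfl, rfl, fun y hy => Or.inl hy⟩
  | cons nb l ih =>
    intro v acc hx
    simp only [List.foldl_cons]
    by_cases h : v.getD (pvIdx v.length nb) 0 < 0
    · simp only [pvStep, h, if_pos]
      have hnb : pvIdx v.length nb < v.length := pvGetD_lt_length h
      set v1 := v.set (pvIdx v.length nb) (v.getD (pvIdx v.length x) 0 + 1) with hv1
      have hlen1 : v1.length = v.length := by simp [hv1]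
      have hpres1 : ∀ i, 0 ≤ v.getD i 0 → v1.getD i 0 = v.getD i 0 := by
        intro i hi
        have : i ≠ pvIdx v.length nb := fun he => by rw [he] at hi; omega
        exact pvGetD_set_ne _ this
      have hx1 : 0 ≤ v1.getD (pvIdx v1.length x) 0 := by
        rw [hlen1, hpres1 _ hx]; exact hx
      have hnb1 : 0 ≤ v1.getD (pvIdx v.length nb) 0 := by
        rw [hv1, pvGetD_set_self _ hnb]; omega
      have hget : v[pvIdx v.length nb] = v.getD (pvIdx v.length nb) 0 := by
        simp [List.getD_eq_getElem?_getD, List.getElem?_eq_getElem hnb]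
      have hvnb : v[pvIdx v.length nb] < 0 := by rw [hget]; exact h
      have hcn : pvCountNeg v1 + 1 = pvCountNeg v := by
        have hx' : (0:Int) ≤ v[pvIdx v.length x]?.getD 0 := by
          simpa [List.getD_eq_getElem?_getD] using hx
        have hpos : 0 < List.countP (fun z => decide (z < 0)) v := by
          rw [List.countP_pos_iff]
          exact ⟨v[pvIdx v.length nb], List.getElem_mem hnb, by simpa using hvnb⟩
        simp only [pvCountNeg, hv1]
        rw [List.countP_set hnb, if_pos (by simpa using hvnb), if_neg (by simp; omega)]
        omega
      obtain ⟨len1, p1, c1, m1⟩ := ih v1 (acc ++ [nb]) hx1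
      refine ⟨len1.trans hlen1,
        fun i hi => by rw [p1 i (by rw [hpres1 i hi]; exact hi), hpres1 i hi], ?_, ?_⟩
      · rw [c1]; simp; omega
      · intro y hy
        rcases m1 y hy with hy1 | hy1
        · rcases List.mem_append.mp hy1 with hy2 | hy2
          · exact Or.inl hy2
          · right
            have : y = nb := by simpa using hy2
            subst this
            rw [p1 _ hnb1]; exact hnb1
        · right
          rw [hlen1] at hy1
          exact hy1
    · simp only [pvStep, h, if_neg, not_false_iff]
      exact ih v acc hx

lemma pvSweep_inv (adj : List (List Int)) (q : List Int) : ∀ (v acc : List Int), pvInv q v →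
    ((pvSweep adj (v, acc) q).1).length = v.length ∧
    (∀ i, 0 ≤ v.getD i 0 → ((pvSweep adj (v, acc) q).1).getD i 0 = v.getD i 0) ∧
    pvCountNeg (pvSweep adj (v, acc) q).1 + ((pvSweep adj (v, acc) q).2).length
      = pvCountNeg v + acc.length ∧
    (∀ y ∈ (pvSweep adj (v, acc) q).2,
      y ∈ acc ∨ 0 ≤ ((pvSweep adj (v, acc) q).1).getD (pvIdx v.length y) 0) := by
  induction q with
  | nil => intro v acc _; exact ⟨rfl, fun i _ => rfl, rfl, fun y hy => Or.inl hy⟩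
  | cons x t ih =>
    intro v acc hinv
    have hx : 0 ≤ v.getD (pvIdx v.length x) 0 := hinv x (by simp)
    obtain ⟨len1, p1, c1, m1⟩ :=
      pvStepFold_inv x (adj.getD (pvIdx adj.length x) []) v acc hx
    have hinv1 : pvInv t ((adj.getD (pvIdx adj.length x) []).foldl (pvStep x) (v, acc)).1 := by
      intro y hy
      rw [len1, p1 _ (hinv y (by simp [hy]))]
      exact hinv y (by simp [hy])
    obtain ⟨len2, p2, c2, m2⟩ := ih ((adj.getD (pvIdx adj.length x) []).foldl (pvStep x) (v, acc)).1
      ((adj.getD (pvIdx adj.length x) []).foldl (pvStep x) (v, acc)).2 hinv1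
    have hsw : pvSweep adj (v, acc) (x :: t)
        = pvSweep adj (((adj.getD (pvIdx adj.length x) []).foldl (pvStep x) (v, acc)).1,
            ((adj.getD (pvIdx adj.length x) []).foldl (pvStep x) (v, acc)).2) t := by
      simp [pvSweep, List.foldl_cons]
    rw [hsw]
    refine ⟨len2.trans len1,
      fun i hi => by rw [p2 i (by rw [p1 i hi]; exact hi), p1 i hi], by rw [c2, c1], ?_⟩
    intro y hy
    rcases m2 y hy with hy1 | hy1
    · rcases m1 y hy1 with hy2 | hy2
      · exact Or.inl hy2
      · exact Or.inr (by rw [p2 _ hy2]; exact hy2)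
    · rw [len1] at hy1
      exact Or.inr hy1

lemma pvMain (adj : List (List Int)) : ∀ (fB : Nat) (q v : List Int) (fA : Nat),
    pvInv q v → pvCountNeg v + q.length ≤ fA → pvCountNeg v + q.length ≤ fB →
    pvBfsA adj fA q v = pvBfsB adj fB q v := by
  intro fB
  induction fB with
  | zero =>
    intro q v fA _ _ hB
    have hq : q = [] := List.eq_nil_of_length_eq_zero (by omega)
    subst hq
    cases fA <;> simp [pvBfsA, pvBfsB]
  | succ g ih =>
    intro q v fA hinv hA hB
    cases q with
    | nil => cases fA <;> simp [pvBfsA, pvBfsB]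
    | cons x t =>
      obtain ⟨len, _, c, m⟩ := pvSweep_inv adj (x :: t) v [] hinv
      rcases hS : pvSweep adj (v, []) (x :: t) with ⟨s1, s2⟩
      rw [hS] at c m len
      simp at c len
      simp only [List.length_cons] at hA hB
      have hfa : fA = (x :: t).length + (fA - (x :: t).length) := by simp; omega
      have hlay := pvLayers adj (x :: t) (fA - (x :: t).length) [] v
      rw [List.append_nil, List.nil_append, hS] at hlay
      simp only [] at hlay
      have hBstep : pvBfsB adj (g + 1) (x :: t) v = pvBfsB adj g s2 s1 := by
        simp only [pvBfsB, hS]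
      rw [hfa, hlay, hBstep]
      apply ih
      · intro y hy
        rcases m y hy with hy1 | hy1
        · simp at hy1
        · rw [len]
          exact hy1
      · simp only [List.length_cons]; omega
      · omega

lemma pvStart_inv (m d : Nat) :
    0 ≤ ((List.replicate m (-1 : Int)).set d 0).getD d 0 := by
  by_cases h : d < m
  · rw [pvGetD_set_self _ (by simpa using h)]
  · rw [List.getD_eq_getElem?_getD, List.getElem?_eq_none (by simp; omega)]
    simp

lemma pvFuel (n : Int) (d : Nat) :
    pvCountNeg ((List.replicate (n + 1).toNat (-1 : Int)).set d 0) + 1 ≤ n.toNat + 2 := by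
  have h1 : pvCountNeg ((List.replicate (n + 1).toNat (-1 : Int)).set d 0)
      ≤ ((List.replicate (n + 1).toNat (-1 : Int)).set d 0).length := List.countP_le_length
  simp at h1
  omega

-- ---------- the symmetric road relation on indices ----------
def pvE (m : Nat) (roads : List (Int × Int)) (i j : Nat) : Prop :=
  ∃ p ∈ roads, (pvIdx m p.1 = i ∧ pvIdx m p.2 = j) ∨ (pvIdx m p.2 = i ∧ pvIdx m p.1 = j)

lemma pvE_symm {m : Nat} {roads : List (Int × Int)} {i j : Nat} (h : pvE m roads i j) :
    pvE m roads j i := by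
  obtain ⟨p, hp, h | h⟩ := h
  · exact ⟨p, hp, Or.inr ⟨h.2, h.1⟩⟩
  · exact ⟨p, hp, Or.inl ⟨h.2, h.1⟩⟩

lemma pvIdx_lt {n r : Int} (hn : 0 ≤ n) (h1 : -(n + 1) ≤ r) (h2 : r ≤ n) :
    pvIdx (n + 1).toNat r < (n + 1).toNat := by
  unfold pvIdx
  split_ifs with h <;> omega

-- ---------- consistent labellings and their uniqueness ----------
def pvCons (m destI : Nat) (roads : List (Int × Int)) (d : List Int) : Prop :=
  d.length = m ∧ d.getD destI 0 = 0 ∧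
  (∀ i, i < m → d.getD i 0 = -1 ∨ 0 ≤ d.getD i 0) ∧
  (∀ i, i < m → d.getD i 0 = 0 → i = destI) ∧
  (∀ i j, pvE m roads i j → 0 ≤ d.getD i 0 → 0 ≤ d.getD j 0 ∧ d.getD j 0 ≤ d.getD i 0 + 1) ∧
  (∀ i, i < m → 0 < d.getD i 0 →
    ∃ j, pvE m roads j i ∧ 0 ≤ d.getD j 0 ∧ d.getD j 0 ≤ d.getD i 0 - 1)

lemma pvCons_le (m destI : Nat) (roads : List (Int × Int)) (d d' : List Int)
    (hE : ∀ i j, pvE m roads i j → i < m ∧ j < m)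
    (hd : pvCons m destI roads d) (hd' : pvCons m destI roads d') :
    ∀ k : Nat, ∀ i, i < m → d.getD i 0 = (k : Int) →
      0 ≤ d'.getD i 0 ∧ d'.getD i 0 ≤ (k : Int) := by
  intro k
  induction k using Nat.strong_induction_on with
  | _ k ih =>
    intro i hi hk
    rcases Nat.eq_zero_or_pos k with h0 | h0
    · subst h0
      have : i = destI := hd.2.2.2.1 i hi (by simpa using hk)
      subst this
      rw [hd'.2.1]
      exact ⟨le_refl _, by simp⟩
    · have hpos : 0 < d.getD i 0 := by rw [hk]; exact_mod_cast h0
      obtain ⟨j, hEji, hj0, hjle⟩ := hd.2.2.2.2.2 i hi hpos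
      have hjm : j < m := (hE j i hEji).1
      have hkj : d.getD j 0 = ((d.getD j 0).toNat : Int) := (Int.toNat_of_nonneg hj0).symm
      have hlt : (d.getD j 0).toNat < k := by omega
      obtain ⟨h1, h2⟩ := ih _ hlt j hjm hkj
      obtain ⟨h3, h4⟩ := hd'.2.2.2.2.1 j i hEji h1
      exact ⟨h3, by omega⟩

lemma pvCons_unique (m destI : Nat) (roads : List (Int × Int)) (d d' : List Int)
    (hE : ∀ i j, pvE m roads i j → i < m ∧ j < m)
    (hd : pvCons m destI roads d) (hd' : pvCons m destI roads d') : d = d' := by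
  apply List.ext_getElem (by rw [hd.1, hd'.1])
  intro i hi hi'
  have him : i < m := by rw [← hd.1]; exact hi
  have hgd : d.getD i 0 = d[i] := by
    simp [List.getD_eq_getElem?_getD, List.getElem?_eq_getElem hi]
  have hgd' : d'.getD i 0 = d'[i] := by
    simp [List.getD_eq_getElem?_getD, List.getElem?_eq_getElem hi']
  rw [← hgd, ← hgd']
  rcases hd.2.2.1 i him with h1 | h1 <;> rcases hd'.2.2.1 i him with h2 | h2
  · rw [h1, h2]
  · obtain ⟨h3, h4⟩ := pvCons_le m destI roads d' d hE hd' hd (d'.getD i 0).toNat i him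
      (Int.toNat_of_nonneg h2).symm
    omega
  · obtain ⟨h3, h4⟩ := pvCons_le m destI roads d d' hE hd hd' (d.getD i 0).toNat i him
      (Int.toNat_of_nonneg h1).symm
    omega
  · obtain ⟨h3, h4⟩ := pvCons_le m destI roads d d' hE hd hd' (d.getD i 0).toNat i him
      (Int.toNat_of_nonneg h1).symm
    obtain ⟨h5, h6⟩ := pvCons_le m destI roads d' d hE hd' hd (d'.getD i 0).toNat i him
      (Int.toNat_of_nonneg h2).symm
    omega

-- ---------- adjacency-list characterisation ----------
lemma pvGetD_modify (l : List (List Int)) (k i : Nat) (f : List Int → List Int) :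
    (l.modify k f).getD i [] = if i = k ∧ k < l.length then f (l.getD i []) else l.getD i [] := by
  by_cases hi : i < l.length
  · rw [List.getD_eq_getElem?_getD, List.getElem?_modify, List.getElem?_eq_getElem hi,
      List.getD_eq_getElem?_getD, List.getElem?_eq_getElem hi]
    by_cases hik : i = k
    · subst hik
      simp [hi]
    · simp only [Option.map_eq_map, Option.map_some, Option.getD_some]
      rw [if_neg (fun h : k = i => hik h.symm), if_neg (by omega)]
  · have h1 : l.length ≤ i := by omega
    rw [List.getD_eq_getElem?_getD, List.getElem?_modify, List.getElem?_eq_none h1,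
      List.getD_eq_getElem?_getD, List.getElem?_eq_none h1]
    have : ¬ (i = k ∧ k < l.length) := by omega
    simp [this]

def pvAdjStep (adjl : List (List Int)) (ab : Int × Int) : List (List Int) :=
  let adjl' := adjl.modify (pvIdx adjl.length ab.1) (fun l => l ++ [ab.2])
  adjl'.modify (pvIdx adjl'.length ab.2) (fun l => l ++ [ab.1])

lemma pvBuildAdj_eq (n : Int) (roads : List (Int × Int)) :
    pvBuildAdj n roads = roads.foldl pvAdjStep (List.replicate (n + 1).toNat []) := rfl

lemma pvAdjStep_length (acc : List (List Int)) (p : Int × Int) :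
    (pvAdjStep acc p).length = acc.length := by
  simp [pvAdjStep]

lemma pvAdjStep_mem (m : Nat) (acc : List (List Int)) (p : Int × Int)
    (hlen : acc.length = m) (ha : pvIdx m p.1 < m) (hb : pvIdx m p.2 < m) :
    ∀ i r, r ∈ (pvAdjStep acc p).getD i [] ↔
      r ∈ acc.getD i [] ∨ (i = pvIdx m p.1 ∧ r = p.2) ∨ (i = pvIdx m p.2 ∧ r = p.1) := by
  intro i r
  have hlen' : (acc.modify (pvIdx m p.1) (fun l => l ++ [p.2])).length = acc.length := by
    simp
  simp only [pvAdjStep, hlen, hlen']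
  rw [pvGetD_modify, hlen', hlen, pvGetD_modify, hlen]
  by_cases h1 : i = pvIdx m p.1 <;> by_cases h2 : i = pvIdx m p.2 <;>
    simp [h1, h2, ha, hb] <;> split_ifs with h3 <;> simp_all

lemma pvBuild_aux (m : Nat) : ∀ (rs : List (Int × Int)) (acc : List (List Int)),
    acc.length = m →
    (∀ p ∈ rs, pvIdx m p.1 < m ∧ pvIdx m p.2 < m) →
    (rs.foldl pvAdjStep acc).length = m ∧
    (∀ i j, (∃ r ∈ (rs.foldl pvAdjStep acc).getD i [], pvIdx m r = j)
      ↔ ((∃ r ∈ acc.getD i [], pvIdx m r = j) ∨ pvE m rs i j)) := by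
  intro rs
  induction rs with
  | nil =>
    intro acc hlen _
    refine ⟨hlen, fun i j => ?_⟩
    simp [pvE]
  | cons p rs ih =>
    intro acc hlen hr
    have hp := hr p (by simp)
    have hlen1 : (pvAdjStep acc p).length = m := by rw [pvAdjStep_length, hlen]
    obtain ⟨l1, c1⟩ := ih (pvAdjStep acc p) hlen1 (fun q hq => hr q (by simp [hq]))
    refine ⟨by simpa using l1, fun i j => ?_⟩
    rw [List.foldl_cons, c1 i j]
    constructor
    · rintro (⟨r, hr1, hr2⟩ | hE)
      · rcases (pvAdjStep_mem m acc p hlen hp.1 hp.2 i r).mp hr1 with h | ⟨h3, h4⟩ | ⟨h3, h4⟩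
        · exact Or.inl ⟨r, h, hr2⟩
        · exact Or.inr ⟨p, by simp, Or.inl ⟨h3.symm, by rw [← hr2, h4]⟩⟩
        · exact Or.inr ⟨p, by simp, Or.inr ⟨h3.symm, by rw [← hr2, h4]⟩⟩
      · obtain ⟨q, hq, hor⟩ := hE
        exact Or.inr ⟨q, by simp [hq], hor⟩
    · rintro (⟨r, hr1, hr2⟩ | ⟨q, hq, hor⟩)
      · exact Or.inl ⟨r, (pvAdjStep_mem m acc p hlen hp.1 hp.2 i r).mpr (Or.inl hr1), hr2⟩
      · rcases List.mem_cons.mp hq with rfl | hq'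
        · rcases hor with ⟨h3, h4⟩ | ⟨h3, h4⟩
          · exact Or.inl ⟨q.2, (pvAdjStep_mem m acc q hlen hp.1 hp.2 i q.2).mpr
              (Or.inr (Or.inl ⟨h3.symm, rfl⟩)), h4⟩
          · exact Or.inl ⟨q.1, (pvAdjStep_mem m acc q hlen hp.1 hp.2 i q.1).mpr
              (Or.inr (Or.inr ⟨h3.symm, rfl⟩)), h4⟩
        · exact Or.inr ⟨q, hq', hor⟩

lemma pvBuildAdj_length (n : Int) (roads : List (Int × Int))
    (hr : ∀ p ∈ roads, pvIdx (n + 1).toNat p.1 < (n + 1).toNat ∧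
      pvIdx (n + 1).toNat p.2 < (n + 1).toNat) :
    (pvBuildAdj n roads).length = (n + 1).toNat := by
  rw [pvBuildAdj_eq]
  exact (pvBuild_aux (n + 1).toNat roads _ (by simp) hr).1

lemma pvBuildAdj_char (n : Int) (roads : List (Int × Int))
    (hr : ∀ p ∈ roads, pvIdx (n + 1).toNat p.1 < (n + 1).toNat ∧
      pvIdx (n + 1).toNat p.2 < (n + 1).toNat) :
    ∀ i j, (∃ r ∈ (pvBuildAdj n roads).getD i [], pvIdx (n + 1).toNat r = j)
      ↔ pvE (n + 1).toNat roads i j := by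
  intro i j
  rw [pvBuildAdj_eq]
  rw [(pvBuild_aux (n + 1).toNat roads _ (by simp) hr).2 i j]
  have hrep : (List.replicate (n + 1).toNat ([] : List Int)).getD i [] = [] := by
    rw [List.getD_eq_getElem?_getD]
    rcases lt_or_ge i (n + 1).toNat with h | h
    · simp [h]
    · rw [List.getElem?_eq_none (by simpa using h)]
      rfl
  rw [hrep]
  simp

-- ---------- B side: Bellman-Ford invariant, potential and fixpoint ----------
def pvCntSet (v : List Int) : Nat := v.countP (fun z => decide (0 ≤ z))
def pvPotC (m : Nat) (c : Int) : Nat := if c < 0 then m else c.toNat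
def pvPot (m : Nat) (v : List Int) : Nat := (v.map (pvPotC m)).sum

def pvBI (m destI : Nat) (roads : List (Int × Int)) (v : List Int) : Prop :=
  v.length = m ∧ v.getD destI 0 = 0 ∧
  (∀ i, i < m → v.getD i 0 = -1 ∨ 0 ≤ v.getD i 0) ∧
  (∀ i, i < m → v.getD i 0 = 0 → i = destI) ∧
  (∀ i, i < m → 0 < v.getD i 0 →
    ∃ j, pvE m roads j i ∧ 0 ≤ v.getD j 0 ∧ v.getD j 0 ≤ v.getD i 0 - 1) ∧
  (∀ i, i < m → 0 ≤ v.getD i 0 → v.getD i 0 + 1 ≤ (pvCntSet v : Int))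

lemma pvGetD_eq_getElem {v : List Int} {i : Nat} (h : i < v.length) : v.getD i 0 = v[i] := by
  simp [List.getD_eq_getElem?_getD, List.getElem?_eq_getElem h]

lemma pvPot_set (m : Nat) : ∀ (v : List Int) (j : Nat) (a : Int), j < v.length →
    pvPot m (v.set j a) + pvPotC m (v.getD j 0) = pvPot m v + pvPotC m a := by
  intro v
  induction v with
  | nil => intro j a h; simp at h
  | cons c v ih =>
    intro j a h
    cases j with
    | zero => simp [pvPot, List.getD]; omega
    | succ j =>
      have h' : j < v.length := by simpa using h
      have := ih j a h'
      simp only [List.set_cons_succ, pvPot, List.map_cons, List.sum_cons, List.getD_cons_succ]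
      simp only [pvPot] at this
      omega

lemma pvCntSet_set_neg {v : List Int} {j : Nat} {a : Int} (hj : j < v.length)
    (hold : v.getD j 0 < 0) (ha : 0 ≤ a) : pvCntSet (v.set j a) = pvCntSet v + 1 := by
  unfold pvCntSet
  have hgetj : v[j] < 0 := by rw [← pvGetD_eq_getElem hj]; exact hold
  rw [List.countP_set hj, if_neg (by simp; omega), if_pos (by simpa using ha)]
  omega

lemma pvCntSet_set_nonneg {v : List Int} {j : Nat} {a : Int} (hj : j < v.length)
    (hold : 0 ≤ v.getD j 0) (ha : 0 ≤ a) : pvCntSet (v.set j a) = pvCntSet v := by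
  unfold pvCntSet
  have hcnt : 0 < v.countP (fun z => decide (0 ≤ z)) := by
    rw [List.countP_pos_iff]
    exact ⟨v[j], List.getElem_mem hj, by rw [← pvGetD_eq_getElem hj] at *; simpa using hold⟩
  have hgetj : 0 ≤ v[j] := by rw [← pvGetD_eq_getElem hj]; exact hold
  rw [List.countP_set hj, if_pos (by simpa using hgetj), if_pos (by simpa using ha)]
  omega

lemma pvCntSet_lt {v : List Int} {j : Nat} (hj : j < v.length) (hneg : v.getD j 0 < 0) :
    pvCntSet v < v.length := by
  rcases Nat.lt_or_ge (pvCntSet v) v.length with h | h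
  · exact h
  · exfalso
    have heq : pvCntSet v = v.length := le_antisymm List.countP_le_length h
    have hall := List.countP_eq_length.mp heq v[j] (List.getElem_mem hj)
    have hvj : v[j] < 0 := by rw [← pvGetD_eq_getElem hj]; exact hneg
    simp at hall
    omega

lemma pvRelax_false {m : Nat} {v : List Int} {u w : Int} (hlen : v.length = m)
    (h : (pvRelax v u w).2 = false) (hu : 0 ≤ v.getD (pvIdx m u) 0) :
    0 ≤ v.getD (pvIdx m w) 0 ∧ v.getD (pvIdx m w) 0 ≤ v.getD (pvIdx m u) 0 + 1 := by
  unfold pvRelax at h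
  rw [hlen] at h
  by_cases hc : 0 ≤ v.getD (pvIdx m u) 0 ∧
      (v.getD (pvIdx m w) 0 < 0 ∨ v.getD (pvIdx m u) 0 + 1 < v.getD (pvIdx m w) 0)
  · rw [if_pos hc] at h
    exact absurd h (by simp)
  · push_neg at hc
    obtain ⟨h1, h2⟩ := hc hu
    exact ⟨by omega, by omega⟩

lemma pvRelax_inv (m destI : Nat) (roads : List (Int × Int)) (v : List Int) (u w : Int)
    (hE : pvE m roads (pvIdx m u) (pvIdx m w))
    (hu : pvIdx m u < m) (hw : pvIdx m w < m)
    (hB : pvBI m destI roads v) :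
    pvBI m destI roads (pvRelax v u w).1 ∧
    ((pvRelax v u w).2 = true → pvPot m (pvRelax v u w).1 < pvPot m v) ∧
    ((pvRelax v u w).2 = false → (pvRelax v u w).1 = v) := by
  obtain ⟨hlen, hdest, hP2, hP5, hP4, hBd⟩ := hB
  set iu := pvIdx m u with hiu
  set iw := pvIdx m w with hiw
  unfold pvRelax
  rw [hlen, ← hiu, ← hiw]
  split_ifs with hc
  · -- the relaxation fires
    obtain ⟨hu0, hor⟩ := hc
    have hne : iu ≠ iw := by
      intro h; rw [h] at hu0 hor; rcases hor with h1 | h1 <;> omega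
    set a := v.getD iu 0 + 1 with ha
    have hwlen : iw < v.length := by omega
    have hulen : iu < v.length := by omega
    have ha0 : 0 < a := by omega
    set v' := v.set iw a with hv'
    have hlen' : v'.length = m := by rw [hv']; simp [hlen]
    have hgw : v'.getD iw 0 = a := pvGetD_set_self _ hwlen
    have hgo : ∀ i, i ≠ iw → v'.getD i 0 = v.getD i 0 := fun i hi => pvGetD_set_ne _ hi
    have hcnt : pvCntSet v ≤ pvCntSet v' ∧ (v'.getD iw 0 + 1 ≤ (pvCntSet v' : Int)) := by
      rw [hgw, hv']
      rcases lt_or_ge (v.getD iw 0) 0 with hneg | hpos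
      · rw [pvCntSet_set_neg hwlen hneg (by omega)]
        have := hBd iu hu hu0
        constructor
        · omega
        · push_cast; omega
      · rw [pvCntSet_set_nonneg hwlen hpos (by omega)]
        have h1 := hBd iw hw hpos
        have h2 : a < v.getD iw 0 := by rcases hor with h | h <;> omega
        exact ⟨le_refl _, by omega⟩
    have hwne : iw ≠ destI := by
      intro h
      rw [h, hdest] at hor
      rcases hor with h1 | h1 <;> omega
    refine ⟨⟨hlen', ?_, ?_, ?_, ?_, ?_⟩, ?_, ?_⟩
    · rw [hgo destI (fun h => hwne h.symm)]; exact hdest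
    · intro i him
      by_cases hi : i = iw
      · subst hi; rw [hgw]; right; omega
      · rw [hgo i hi]; exact hP2 i him
    · intro i him h0
      by_cases hi : i = iw
      · subst hi; rw [hgw] at h0; omega
      · rw [hgo i hi] at h0; exact hP5 i him h0
    · intro i him hpos
      by_cases hi : i = iw
      · subst hi
        refine ⟨iu, hE, ?_, ?_⟩
        · rw [hgo iu hne]; exact hu0
        · rw [hgo iu hne, hgw]; omega
      · rw [hgo i hi] at hpos
        obtain ⟨j, hEj, hj0, hjle⟩ := hP4 i him hpos
        by_cases hji : j = iw
        · subst hji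
          refine ⟨iw, hEj, ?_, ?_⟩
          · rw [hgw]; omega
          · rw [hgw, hgo i hi]
            have h2 : a < v.getD iw 0 := by rcases hor with h | h <;> omega
            omega
        · exact ⟨j, hEj, by rw [hgo j hji]; exact hj0,
            by rw [hgo j hji, hgo i hi]; exact hjle⟩
    · intro i him h0
      by_cases hi : i = iw
      · subst hi; exact hcnt.2
      · rw [hgo i hi] at h0 ⊢
        have := hBd i him h0
        have := hcnt.1
        push_cast at *
        omega
    · intro _
      have hpotc : pvPotC m a < pvPotC m (v.getD iw 0) := by
        unfold pvPotC
        rw [if_neg (by omega)]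
        rcases lt_or_ge (v.getD iw 0) 0 with hneg | hpos
        · rw [if_pos hneg]
          have h1 := hBd iu hu hu0
          have h2 := pvCntSet_lt hwlen hneg
          rw [hlen] at h2
          omega
        · rw [if_neg (by omega)]
          have h2 : a < v.getD iw 0 := by rcases hor with h | h <;> omega
          omega
      have hps := pvPot_set m v iw a hwlen
      have hv'eq : pvPot m (v', true).1 = pvPot m (v.set iw a) := by rw [hv']
      omega
    · intro h; simp at h
  · exact ⟨⟨hlen, hdest, hP2, hP5, hP4, hBd⟩, by intro h; simp at h, fun _ => rfl⟩

lemma pvRelax_false_eq {v : List Int} {u w : Int} (h : (pvRelax v u w).2 = false) :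
    (pvRelax v u w).1 = v := by
  unfold pvRelax at h ⊢
  split_ifs with hc
  · rw [if_pos hc] at h
    exact absurd h (by simp)
  · rfl

lemma pvPass_inv (m destI : Nat) (roadsAll : List (Int × Int))
    (hidx : ∀ p ∈ roadsAll, pvIdx m p.1 < m ∧ pvIdx m p.2 < m) :
    ∀ (rs : List (Int × Int)), (∀ p ∈ rs, p ∈ roadsAll) →
    ∀ (v : List Int) (b : Bool), pvBI m destI roadsAll v →
    pvBI m destI roadsAll (pvPass rs (v, b)).1 ∧
    pvPot m (pvPass rs (v, b)).1 ≤ pvPot m v ∧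
    ((pvPass rs (v, b)).2 = false →
      (pvPass rs (v, b)).1 = v ∧ b = false ∧
      (∀ p ∈ rs, (pvRelax v p.1 p.2).2 = false ∧ (pvRelax v p.2 p.1).2 = false)) ∧
    (b = false → (pvPass rs (v, b)).2 = true →
      pvPot m (pvPass rs (v, b)).1 < pvPot m v) := by
  intro rs
  induction rs with
  | nil =>
    intro _ v b hBI
    refine ⟨hBI, le_refl _, ?_, ?_⟩
    · intro h
      exact ⟨rfl, by simpa [pvPass] using h, by simp⟩
    · intro hb ht
      rw [show (pvPass [] (v, b)).2 = b from rfl] at ht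
      rw [hb] at ht
      exact absurd ht (by simp)
  | cons p rs ih =>
    intro hsub v b hBI
    have hp := hsub p (by simp)
    have hip := hidx p hp
    have hE1 : pvE m roadsAll (pvIdx m p.1) (pvIdx m p.2) := ⟨p, hp, Or.inl ⟨rfl, rfl⟩⟩
    have hE2 : pvE m roadsAll (pvIdx m p.2) (pvIdx m p.1) := pvE_symm hE1
    obtain ⟨hBI1, hpot1, heq1⟩ := pvRelax_inv m destI roadsAll v p.1 p.2 hE1 hip.1 hip.2 hBI
    obtain ⟨hBI2, hpot2, heq2⟩ :=
      pvRelax_inv m destI roadsAll (pvRelax v p.1 p.2).1 p.2 p.1 hE2 hip.2 hip.1 hBI1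
    have hstep : pvPass (p :: rs) (v, b)
        = pvPass rs ((pvRelax (pvRelax v p.1 p.2).1 p.2 p.1).1,
            (b || (pvRelax v p.1 p.2).2) || (pvRelax (pvRelax v p.1 p.2).1 p.2 p.1).2) := by
      simp only [pvPass, List.foldl_cons]
    obtain ⟨ihBI, ihpot, ihfalse, ihtrue⟩ :=
      ih (fun q hq => hsub q (by simp [hq])) (pvRelax (pvRelax v p.1 p.2).1 p.2 p.1).1
        ((b || (pvRelax v p.1 p.2).2) || (pvRelax (pvRelax v p.1 p.2).1 p.2 p.1).2) hBI2
    have hpotle1 : pvPot m (pvRelax v p.1 p.2).1 ≤ pvPot m v := by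
      cases hr : (pvRelax v p.1 p.2).2
      · rw [pvRelax_false_eq hr]
      · exact le_of_lt (hpot1 hr)
    have hpotle2 : pvPot m (pvRelax (pvRelax v p.1 p.2).1 p.2 p.1).1
        ≤ pvPot m (pvRelax v p.1 p.2).1 := by
      cases hr : (pvRelax (pvRelax v p.1 p.2).1 p.2 p.1).2
      · rw [pvRelax_false_eq hr]
      · exact le_of_lt (hpot2 hr)
    rw [hstep]
    refine ⟨ihBI, by omega, ?_, ?_⟩
    · intro hfin
      obtain ⟨hv, hflag, hrest⟩ := ihfalse hfin
      have hb : b = false := by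
        cases b
        · rfl
        · simp at hflag
      have hr1 : (pvRelax v p.1 p.2).2 = false := by
        cases hx : (pvRelax v p.1 p.2).2
        · rfl
        · rw [hx] at hflag; simp at hflag
      have hr2 : (pvRelax (pvRelax v p.1 p.2).1 p.2 p.1).2 = false := by
        cases hx : (pvRelax (pvRelax v p.1 p.2).1 p.2 p.1).2
        · rfl
        · rw [hx] at hflag; simp at hflag
      have hv1 : (pvRelax v p.1 p.2).1 = v := pvRelax_false_eq hr1
      have hv2 : (pvRelax (pvRelax v p.1 p.2).1 p.2 p.1).1 = v := by
        rw [pvRelax_false_eq hr2, hv1]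
      refine ⟨by rw [hv, hv2], hb, ?_⟩
      intro q hq
      rcases List.mem_cons.mp hq with rfl | hq'
      · exact ⟨hr1, by rw [← hv1]; exact hr2⟩
      · have := hrest q hq'
        rw [hv2] at this
        exact this
    · intro hb hfin
      by_cases hfire : (pvRelax v p.1 p.2).2 = true ∨
          (pvRelax (pvRelax v p.1 p.2).1 p.2 p.1).2 = true
      · have hstrict : pvPot m (pvRelax (pvRelax v p.1 p.2).1 p.2 p.1).1 < pvPot m v := by
          rcases hfire with hf | hf
          · have := hpot1 hf
            omega
          · have := hpot2 hf
            omega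
        omega
      · push_neg at hfire
        have hr1 : (pvRelax v p.1 p.2).2 = false := by
          cases hx : (pvRelax v p.1 p.2).2
          · rfl
          · exact absurd hx hfire.1
        have hr2 : (pvRelax (pvRelax v p.1 p.2).1 p.2 p.1).2 = false := by
          cases hx : (pvRelax (pvRelax v p.1 p.2).1 p.2 p.1).2
          · rfl
          · exact absurd hx hfire.2
        have hv1 : (pvRelax v p.1 p.2).1 = v := pvRelax_false_eq hr1
        have hv2 : (pvRelax (pvRelax v p.1 p.2).1 p.2 p.1).1 = v := by
          rw [pvRelax_false_eq hr2, hv1]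
        rw [hv2] at ihtrue ihpot hfin ⊢
        exact ihtrue (by rw [hb, hr1, hr2]; rfl) hfin

lemma pvBF_fix (m destI : Nat) (roads : List (Int × Int))
    (hidx : ∀ p ∈ roads, pvIdx m p.1 < m ∧ pvIdx m p.2 < m) :
    ∀ (f : Nat) (v : List Int), pvBI m destI roads v → pvPot m v < f →
    pvCons m destI roads (pvBF roads f v) := by
  intro f
  induction f with
  | zero => intro v _ h; omega
  | succ f ih =>
    intro v hBI hpot
    obtain ⟨hBI', hple, hfalse, htrue⟩ :=
      pvPass_inv m destI roads hidx roads (fun _ h => h) v false hBI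
    show pvCons m destI roads
      (if (pvPass roads (v, false)).2 then pvBF roads f (pvPass roads (v, false)).1
        else (pvPass roads (v, false)).1)
    cases hflag : (pvPass roads (v, false)).2
    · rw [if_neg (by simp)]
      obtain ⟨hv, _, hnofire⟩ := hfalse hflag
      rw [hv]
      obtain ⟨hlen, hdest, hP2, hP5, hP4, _⟩ := hBI
      refine ⟨hlen, hdest, hP2, hP5, ?_, hP4⟩
      intro i j hEij hi0
      obtain ⟨p, hp, hor⟩ := hEij
      obtain ⟨hf1, hf2⟩ := hnofire p hp
      rcases hor with ⟨h1, h2⟩ | ⟨h1, h2⟩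
      · have := pvRelax_false hlen hf1 (by rw [h1]; exact hi0)
        rw [h1, h2] at this
        exact this
      · have := pvRelax_false hlen hf2 (by rw [h1]; exact hi0)
        rw [h1, h2] at this
        exact this
    · rw [if_pos rfl]
      exact ih _ hBI' (by have := htrue rfl hflag; omega)

-- ---------- A side: the layered invariant ----------
def pvLI (m destI : Nat) (roads : List (Int × Int)) (adj : List (List Int))
    (k : Int) (v F : List Int) : Prop :=
  v.length = m ∧ 0 ≤ k ∧
  (∀ i, i < m → v.getD i 0 = -1 ∨ (0 ≤ v.getD i 0 ∧ v.getD i 0 ≤ k)) ∧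
  v.getD destI 0 = 0 ∧
  (∀ i, i < m → v.getD i 0 = 0 → i = destI) ∧
  (∀ x ∈ F, pvIdx m x < m ∧ v.getD (pvIdx m x) 0 = k) ∧
  (∀ i, i < m → v.getD i 0 = k → ∃ x ∈ F, pvIdx m x = i) ∧
  (∀ i, i < m → 0 ≤ v.getD i 0 → v.getD i 0 < k →
    ∀ r ∈ adj.getD i [], 0 ≤ v.getD (pvIdx m r) 0 ∧ v.getD (pvIdx m r) 0 ≤ v.getD i 0 + 1) ∧
  (∀ i, i < m → 0 < v.getD i 0 →
    ∃ j, pvE m roads j i ∧ 0 ≤ v.getD j 0 ∧ v.getD j 0 ≤ v.getD i 0 - 1)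

def pvMI (m : Nat) (roads : List (Int × Int)) (k : Int) (v v' acc : List Int) : Prop :=
  v'.length = m ∧
  (∀ i, 0 ≤ v.getD i 0 → v'.getD i 0 = v.getD i 0) ∧
  (∀ i, i < m → v'.getD i 0 = v.getD i 0 ∨ (v.getD i 0 = -1 ∧ v'.getD i 0 = k + 1)) ∧
  (∀ x ∈ acc, pvIdx m x < m ∧ v'.getD (pvIdx m x) 0 = k + 1) ∧
  (∀ i, i < m → v'.getD i 0 = k + 1 → ∃ x ∈ acc, pvIdx m x = i) ∧
  (∀ i, i < m → 0 < v'.getD i 0 → v.getD i 0 = -1 →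
    ∃ j, pvE m roads j i ∧ 0 ≤ v'.getD j 0 ∧ v'.getD j 0 ≤ v'.getD i 0 - 1)

lemma pvInner (m : Nat) (roads : List (Int × Int)) (k : Int) (v : List Int) (hk : 0 ≤ k)
    (hL1 : ∀ i, i < m → v.getD i 0 = -1 ∨ (0 ≤ v.getD i 0 ∧ v.getD i 0 ≤ k))
    (x : Int) (_hxm : pvIdx m x < m) (hxv : v.getD (pvIdx m x) 0 = k) :
    ∀ (lst : List Int), (∀ r ∈ lst, pvIdx m r < m ∧ pvE m roads (pvIdx m x) (pvIdx m r)) →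
    ∀ (v' acc : List Int), pvMI m roads k v v' acc →
    pvMI m roads k v (lst.foldl (pvStep x) (v', acc)).1 (lst.foldl (pvStep x) (v', acc)).2 ∧
    (∀ i, 0 ≤ v'.getD i 0 → (lst.foldl (pvStep x) (v', acc)).1.getD i 0 = v'.getD i 0) ∧
    (∀ r ∈ lst, 0 ≤ (lst.foldl (pvStep x) (v', acc)).1.getD (pvIdx m r) 0) := by
  intro lst
  induction lst with
  | nil =>
    intro _ v' acc hMI
    exact ⟨hMI, fun i _ => rfl, by simp⟩
  | cons nb lst ih =>
    intro hlst v' acc hMI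
    obtain ⟨hlen', hpres, hrel, hacc, hcmp, hP4⟩ := hMI
    obtain ⟨hnbm, hnbE⟩ := hlst nb (by simp)
    have hxv' : v'.getD (pvIdx m x) 0 = k := by
      rw [hpres (pvIdx m x) (by rw [hxv]; exact hk)]; exact hxv
    simp only [List.foldl_cons]
    by_cases hfire : v'.getD (pvIdx v'.length nb) 0 < 0
    · have hstep : pvStep x (v', acc) nb
          = (v'.set (pvIdx m nb) (k + 1), acc ++ [nb]) := by
        unfold pvStep
        rw [if_pos hfire]
        rw [hlen', hxv']
      rw [hstep]
      rw [hlen'] at hfire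
      have hnblen : pvIdx m nb < v'.length := by omega
      have hxnb : pvIdx m x ≠ pvIdx m nb := by
        intro h; rw [h] at hxv'; omega
      set v'' := v'.set (pvIdx m nb) (k + 1) with hv''
      have hgnb : v''.getD (pvIdx m nb) 0 = k + 1 := pvGetD_set_self _ hnblen
      have hgo : ∀ i, i ≠ pvIdx m nb → v''.getD i 0 = v'.getD i 0 :=
        fun i hi => pvGetD_set_ne _ hi
      have hvnb : v.getD (pvIdx m nb) 0 = -1 := by
        rcases hrel (pvIdx m nb) hnbm with h | h
        · rcases hL1 (pvIdx m nb) hnbm with h2 | h2 <;> omega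
        · omega
      have hMI' : pvMI m roads k v v'' (acc ++ [nb]) := by
        refine ⟨by rw [hv'']; simp [hlen'], ?_, ?_, ?_, ?_, ?_⟩
        · intro i hi
          have hne : i ≠ pvIdx m nb := by
            intro h; rw [h, hvnb] at hi; omega
          rw [hgo i hne]; exact hpres i hi
        · intro i him
          by_cases hi : i = pvIdx m nb
          · subst hi
            exact Or.inr ⟨hvnb, hgnb⟩
          · rw [hgo i hi]; exact hrel i him
        · intro y hy
          rcases List.mem_append.mp hy with hy' | hy'
          · obtain ⟨h1, h2⟩ := hacc y hy'
            have hne : pvIdx m y ≠ pvIdx m nb := by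
              intro h; rw [h] at h2; omega
            exact ⟨h1, by rw [hgo _ hne]; exact h2⟩
          · have : y = nb := by simpa using hy'
            subst this
            exact ⟨hnbm, hgnb⟩
        · intro i him hi
          by_cases hieq : i = pvIdx m nb
          · exact ⟨nb, by simp, hieq.symm⟩
          · rw [hgo i hieq] at hi
            obtain ⟨y, hy1, hy2⟩ := hcmp i him hi
            exact ⟨y, by simp [hy1], hy2⟩
        · intro i him hpos hvi
          by_cases hieq : i = pvIdx m nb
          · subst hieq
            refine ⟨pvIdx m x, hnbE, ?_, ?_⟩
            · rw [hgo _ hxnb, hxv']; exact hk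
            · rw [hgo _ hxnb, hxv', hgnb]; omega
          · rw [hgo i hieq] at hpos ⊢
            obtain ⟨j, hj1, hj2, hj3⟩ := hP4 i him hpos hvi
            have hjne : j ≠ pvIdx m nb := by
              intro h; rw [h] at hj2; omega
            exact ⟨j, hj1, by rw [hgo j hjne]; exact hj2, by rw [hgo j hjne]; exact hj3⟩
      obtain ⟨ihMI, ihpres, ihmark⟩ := ih (fun r hr => hlst r (by simp [hr])) v'' (acc ++ [nb]) hMI'
      refine ⟨ihMI, ?_, ?_⟩
      · intro i hi
        have hne : i ≠ pvIdx m nb := by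
          intro h; rw [h] at hi; omega
        rw [ihpres i (by rw [hgo i hne]; exact hi), hgo i hne]
      · intro r hr
        rcases List.mem_cons.mp hr with rfl | hr'
        · rw [ihpres _ (by rw [hgnb]; omega), hgnb]
          omega
        · exact ihmark r hr'
    · have hstep : pvStep x (v', acc) nb = (v', acc) := by
        unfold pvStep
        rw [if_neg hfire]
      rw [hstep]
      rw [hlen'] at hfire
      push_neg at hfire
      obtain ⟨ihMI, ihpres, ihmark⟩ := ih (fun r hr => hlst r (by simp [hr])) v' acc
        ⟨hlen', hpres, hrel, hacc, hcmp, hP4⟩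
      refine ⟨ihMI, ihpres, ?_⟩
      intro r hr
      rcases List.mem_cons.mp hr with rfl | hr'
      · rw [ihpres _ hfire]; exact hfire
      · exact ihmark r hr'

lemma pvOuter (m : Nat) (roads : List (Int × Int)) (adj : List (List Int)) (k : Int)
    (v : List Int) (hk : 0 ≤ k)
    (hL1 : ∀ i, i < m → v.getD i 0 = -1 ∨ (0 ≤ v.getD i 0 ∧ v.getD i 0 ≤ k))
    (hlenadj : adj.length = m)
    (hadj : ∀ i, i < m → ∀ r ∈ adj.getD i [], pvIdx m r < m ∧ pvE m roads i (pvIdx m r)) :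
    ∀ (Fr : List Int), (∀ x ∈ Fr, pvIdx m x < m ∧ v.getD (pvIdx m x) 0 = k) →
    ∀ (v' acc : List Int), pvMI m roads k v v' acc →
    pvMI m roads k v (pvSweep adj (v', acc) Fr).1 (pvSweep adj (v', acc) Fr).2 ∧
    (∀ i, 0 ≤ v'.getD i 0 → (pvSweep adj (v', acc) Fr).1.getD i 0 = v'.getD i 0) ∧
    (∀ x ∈ Fr, ∀ r ∈ adj.getD (pvIdx m x) [],
      0 ≤ (pvSweep adj (v', acc) Fr).1.getD (pvIdx m r) 0) := by
  intro Fr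
  induction Fr with
  | nil =>
    intro _ v' acc hMI
    exact ⟨hMI, fun i _ => rfl, by simp⟩
  | cons x Fr ih =>
    intro hFr v' acc hMI
    obtain ⟨hxm, hxv⟩ := hFr x (by simp)
    have hsw : pvSweep adj (v', acc) (x :: Fr)
        = pvSweep adj ((adj.getD (pvIdx m x) []).foldl (pvStep x) (v', acc)) Fr := by
      simp only [pvSweep, List.foldl_cons, hlenadj]
    rw [hsw]
    obtain ⟨iMI, ipres, imark⟩ := pvInner m roads k v hk hL1 x hxm hxv
      (adj.getD (pvIdx m x) []) (hadj (pvIdx m x) hxm) v' acc hMI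
    rcases hG : (adj.getD (pvIdx m x) []).foldl (pvStep x) (v', acc) with ⟨w1, acc1⟩
    rw [hG] at iMI ipres imark
    obtain ⟨jMI, jpres, jmark⟩ := ih (fun y hy => hFr y (by simp [hy])) w1 acc1 iMI
    refine ⟨jMI, ?_, ?_⟩
    · intro i hi
      rw [jpres i (by rw [ipres i hi]; exact hi), ipres i hi]
    · intro y hy
      rcases List.mem_cons.mp hy with rfl | hy'
      · intro r hr
        have h1 := imark r hr
        rw [jpres _ h1]
        exact h1
      · exact jmark y hy'

lemma pvLI_step (m destI : Nat) (roads : List (Int × Int)) (adj : List (List Int))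
    (hlenadj : adj.length = m)
    (hadj : ∀ i, i < m → ∀ r ∈ adj.getD i [], pvIdx m r < m ∧ pvE m roads i (pvIdx m r))
    (k : Int) (v F : List Int) (hLI : pvLI m destI roads adj k v F) :
    pvLI m destI roads adj (k + 1) (pvSweep adj (v, []) F).1 (pvSweep adj (v, []) F).2 := by
  obtain ⟨hlen, hk, hL1, hdest, hzero, hFv, hFc, hL3, hP4⟩ := hLI
  have hMI0 : pvMI m roads k v v [] := by
    refine ⟨hlen, fun i _ => rfl, fun i _ => Or.inl rfl, by simp, ?_, ?_⟩
    · intro i him hi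
      rcases hL1 i him with h | h <;> omega
    · intro i him hpos hneg
      omega
  obtain ⟨hMI, hpresv, hmark⟩ := pvOuter m roads adj k v hk hL1 hlenadj hadj F hFv v [] hMI0
  obtain ⟨hlen', hpres, hrel, hacc, hcmp, hP4'⟩ := hMI
  have hL1' : ∀ i, i < m → (pvSweep adj (v, []) F).1.getD i 0 = -1 ∨
      (0 ≤ (pvSweep adj (v, []) F).1.getD i 0 ∧ (pvSweep adj (v, []) F).1.getD i 0 ≤ k + 1) := by
    intro i him
    rcases hrel i him with h | h
    · rw [h]
      rcases hL1 i him with h2 | h2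
      · exact Or.inl h2
      · exact Or.inr ⟨h2.1, by omega⟩
    · rw [h.2]
      exact Or.inr ⟨by omega, le_refl _⟩
  refine ⟨hlen', by omega, hL1', ?_, ?_, hacc, hcmp, ?_, ?_⟩
  · rw [hpres destI (by rw [hdest])]
    exact hdest
  · intro i him hi
    rcases hrel i him with h | h
    · rw [h] at hi
      exact hzero i him hi
    · rw [h.2] at hi
      omega
  · -- the processed-levels property at k+1
    intro i him h0 hlt
    rcases hrel i him with h | h
    · rw [h] at h0 hlt ⊢
      rcases lt_or_ge (v.getD i 0) k with hcase | hcase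
      · intro r hr
        obtain ⟨h1, h2⟩ := hL3 i him h0 hcase r hr
        rw [hpres _ h1]
        exact ⟨h1, h2⟩
      · have hik : v.getD i 0 = k := by
          rcases hL1 i him with hx | hx <;> omega
        obtain ⟨x, hxF, hxi⟩ := hFc i him hik
        intro r hr
        rw [← hxi] at hr ⊢
        have h1 := hmark x hxF r hr
        refine ⟨h1, ?_⟩
        have hrm : pvIdx m r < m := (hadj (pvIdx m x) (by rw [hxi]; exact him) r hr).1
        rcases hL1' (pvIdx m r) hrm with h2 | h2
        · omega
        · rw [hxi, hik]
          omega
    · rw [h.2] at hlt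
      omega
  · intro i him hpos
    rcases hrel i him with h | h
    · rw [h] at hpos ⊢
      obtain ⟨j, hj1, hj2, hj3⟩ := hP4 i him hpos
      have he := hpres j hj2
      exact ⟨j, hj1, by rw [he]; exact hj2, by rw [he]; exact hj3⟩
    · exact hP4' i him (by omega) h.1

lemma pvBfsB_nil (adj : List (List Int)) (f : Nat) (v : List Int) :
    pvBfsB adj f [] v = v := by
  cases f <;> rfl

lemma pvLI_done (m destI : Nat) (roads : List (Int × Int)) (adj : List (List Int))
    (hEsub : ∀ i j, pvE m roads i j → i < m ∧ j < m)
    (hadjc : ∀ i j, pvE m roads i j → ∃ r ∈ adj.getD i [], pvIdx m r = j)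
    (k : Int) (v : List Int) (hLI : pvLI m destI roads adj k v []) :
    pvCons m destI roads v := by
  obtain ⟨hlen, hk, hL1, hdest, hzero, _, hFc, hL3, hP4⟩ := hLI
  refine ⟨hlen, hdest, ?_, hzero, ?_, hP4⟩
  · intro i him
    rcases hL1 i him with h | h
    · exact Or.inl h
    · exact Or.inr h.1
  · intro i j hEij hi0
    obtain ⟨him, hjm⟩ := hEsub i j hEij
    have hlt : v.getD i 0 < k := by
      rcases lt_or_ge (v.getD i 0) k with h | h
      · exact h
      · have hik : v.getD i 0 = k := by
          rcases hL1 i him with hx | hx <;> omega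
        obtain ⟨x, hxF, _⟩ := hFc i him hik
        exact absurd hxF (by simp)
    obtain ⟨r, hr, hrj⟩ := hadjc i j hEij
    have := hL3 i him hi0 hlt r hr
    rw [hrj] at this
    exact this

lemma pvLayers_cons (m destI : Nat) (roads : List (Int × Int)) (adj : List (List Int))
    (hlenadj : adj.length = m)
    (hEsub : ∀ i j, pvE m roads i j → i < m ∧ j < m)
    (hadj : ∀ i, i < m → ∀ r ∈ adj.getD i [], pvIdx m r < m ∧ pvE m roads i (pvIdx m r))
    (hadjc : ∀ i j, pvE m roads i j → ∃ r ∈ adj.getD i [], pvIdx m r = j) :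
    ∀ (f : Nat) (k : Int) (v F : List Int), pvLI m destI roads adj k v F →
    pvCountNeg v + 1 ≤ f → pvCons m destI roads (pvBfsB adj f F v) := by
  intro f
  induction f with
  | zero => intro k v F _ h; omega
  | succ f ih =>
    intro k v F hLI hcnt
    cases F with
    | nil =>
      rw [pvBfsB_nil]
      exact pvLI_done m destI roads adj hEsub hadjc k v hLI
    | cons x Fr =>
      have hLI' := pvLI_step m destI roads adj hlenadj hadj k v (x :: Fr) hLI
      have hInv : pvInv (x :: Fr) v := by
        intro y hy
        obtain ⟨h1, h2⟩ := hLI.2.2.2.2.2.1 y hy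
        rw [hLI.1, h2]
        exact hLI.2.1
      obtain ⟨_, _, hc, _⟩ := pvSweep_inv adj (x :: Fr) v [] hInv
      have hstep : pvBfsB adj (f + 1) (x :: Fr) v
          = pvBfsB adj f (pvSweep adj (v, []) (x :: Fr)).2 (pvSweep adj (v, []) (x :: Fr)).1 := by
        simp only [pvBfsB]
      rw [hstep]
      cases hF1 : (pvSweep adj (v, []) (x :: Fr)).2 with
      | nil =>
        rw [pvBfsB_nil]
        rw [hF1] at hLI'
        exact pvLI_done m destI roads adj hEsub hadjc (k + 1) _ hLI'
      | cons y Fr' =>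
        rw [← hF1]
        apply ih (k + 1) _ _ hLI'
        rw [hF1] at hc
        simp only [List.length_cons, List.length_nil] at hc
        omega

lemma pvRepl_getD (m i : Nat) (h : i < m) :
    (List.replicate m (-1 : Int)).getD i 0 = -1 := by
  rw [List.getD_eq_getElem?_getD]
  simp [h]

lemma pvPot_replicate (m : Nat) : pvPot m (List.replicate m (-1 : Int)) = m * m := by
  unfold pvPot
  rw [List.map_replicate, List.sum_replicate, smul_eq_mul]
  unfold pvPotC
  rw [if_pos (by omega)]

-- ===== VERDICT (by name: the statement is the Claim_ definition above) =====
theorem solution_spec : Claim_equal_solution := by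
  intro n roads sources destination _ hPre
  obtain ⟨hn, hroads, _, hd1, hd2⟩ := hPre
  show solution n roads sources destination = solution_alt n roads sources destination
  simp only [solution, solution_alt]
  rw [PySem.List.foldl_append_singleton_eq_map, List.nil_append]
  have hidx : ∀ p ∈ roads, pvIdx (n + 1).toNat p.1 < (n + 1).toNat ∧
      pvIdx (n + 1).toNat p.2 < (n + 1).toNat := by
    intro p hp
    obtain ⟨h1, h2, h3, h4⟩ := hroads p hp
    exact ⟨pvIdx_lt hn h1 h2, pvIdx_lt hn h3 h4⟩
  have hdI : pvIdx (n + 1).toNat destination < (n + 1).toNat := pvIdx_lt hn hd1 hd2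
  have hEsub : ∀ i j, pvE (n + 1).toNat roads i j → i < (n + 1).toNat ∧ j < (n + 1).toNat := by
    intro i j ⟨p, hp, hor⟩
    obtain ⟨h1, h2⟩ := hidx p hp
    rcases hor with ⟨ha, hb⟩ | ⟨ha, hb⟩ <;> rw [← ha, ← hb] <;> exact ⟨by assumption, by assumption⟩
  have hlenadj := pvBuildAdj_length n roads hidx
  have hchar := pvBuildAdj_char n roads hidx
  have hadj : ∀ i, i < (n + 1).toNat → ∀ r ∈ (pvBuildAdj n roads).getD i [],
      pvIdx (n + 1).toNat r < (n + 1).toNat ∧ pvE (n + 1).toNat roads i (pvIdx (n + 1).toNat r) := by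
    intro i _ r hr
    have hEij : pvE (n + 1).toNat roads i (pvIdx (n + 1).toNat r) :=
      (hchar i (pvIdx (n + 1).toNat r)).mp ⟨r, hr, rfl⟩
    exact ⟨(hEsub _ _ hEij).2, hEij⟩
  have hadjc : ∀ i j, pvE (n + 1).toNat roads i j →
      ∃ r ∈ (pvBuildAdj n roads).getD i [], pvIdx (n + 1).toNat r = j :=
    fun i j hE => (hchar i j).mpr hE
  have hlen0 : ((List.replicate (n + 1).toNat (-1 : Int)).set
      (pvIdx (n + 1).toNat destination) 0).length = (n + 1).toNat := by simp
  have hv0dest : ((List.replicate (n + 1).toNat (-1 : Int)).set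
      (pvIdx (n + 1).toNat destination) 0).getD (pvIdx (n + 1).toNat destination) 0 = 0 :=
    pvGetD_set_self _ (by simpa using hdI)
  have hv0other : ∀ i, i ≠ pvIdx (n + 1).toNat destination → i < (n + 1).toNat →
      ((List.replicate (n + 1).toNat (-1 : Int)).set
        (pvIdx (n + 1).toNat destination) 0).getD i 0 = -1 := by
    intro i hne him
    rw [pvGetD_set_ne _ hne]
    exact pvRepl_getD _ i him
  have hLI0 : pvLI (n + 1).toNat (pvIdx (n + 1).toNat destination) roads (pvBuildAdj n roads) 0
      ((List.replicate (n + 1).toNat (-1 : Int)).set (pvIdx (n + 1).toNat destination) 0)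
      [destination] := by
    refine ⟨hlen0, le_refl _, ?_, hv0dest, ?_, ?_, ?_, ?_, ?_⟩
    · intro i him
      by_cases hi : i = pvIdx (n + 1).toNat destination
      · subst hi; rw [hv0dest]; exact Or.inr ⟨le_refl _, le_refl _⟩
      · rw [hv0other i hi him]; exact Or.inl rfl
    · intro i him hi
      by_cases h : i = pvIdx (n + 1).toNat destination
      · exact h
      · rw [hv0other i h him] at hi; omega
    · intro x hx
      have : x = destination := by simpa using hx
      subst this
      exact ⟨hdI, hv0dest⟩
    · intro i him hi
      by_cases h : i = pvIdx (n + 1).toNat destination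
      · exact ⟨destination, by simp, h.symm⟩
      · rw [hv0other i h him] at hi; omega
    · intro i _ h1 h2
      omega
    · intro i him hpos
      by_cases h : i = pvIdx (n + 1).toNat destination
      · subst h; rw [hv0dest] at hpos; omega
      · rw [hv0other i h him] at hpos; omega
  have consA := pvLayers_cons (n + 1).toNat (pvIdx (n + 1).toNat destination) roads
    (pvBuildAdj n roads) hlenadj hEsub hadj hadjc (n.toNat + 2) 0 _ _ hLI0
    (pvFuel n (pvIdx (n + 1).toNat destination))
  have hAB : pvBfsA (pvBuildAdj n roads) (n.toNat + 2) [destination]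
        ((List.replicate (n + 1).toNat (-1 : Int)).set (pvIdx (n + 1).toNat destination) 0)
      = pvBfsB (pvBuildAdj n roads) (n.toNat + 2) [destination]
        ((List.replicate (n + 1).toNat (-1 : Int)).set (pvIdx (n + 1).toNat destination) 0) := by
    apply pvMain
    · intro x hx
      have hxd : x = destination := by simpa using hx
      rw [hxd, hlen0]
      exact pvStart_inv _ _
    · simpa using pvFuel n (pvIdx (n + 1).toNat destination)
    · simpa using pvFuel n (pvIdx (n + 1).toNat destination)
  have hBI0 : pvBI (n + 1).toNat (pvIdx (n + 1).toNat destination) roads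
      ((List.replicate (n + 1).toNat (-1 : Int)).set (pvIdx (n + 1).toNat destination) 0) := by
    refine ⟨hlen0, hv0dest, ?_, ?_, ?_, ?_⟩
    · intro i him
      by_cases hi : i = pvIdx (n + 1).toNat destination
      · subst hi; rw [hv0dest]; exact Or.inr (le_refl _)
      · rw [hv0other i hi him]; exact Or.inl rfl
    · intro i him hi
      by_cases h : i = pvIdx (n + 1).toNat destination
      · exact h
      · rw [hv0other i h him] at hi; omega
    · intro i him hpos
      by_cases h : i = pvIdx (n + 1).toNat destination
      · subst h; rw [hv0dest] at hpos; omega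
      · rw [hv0other i h him] at hpos; omega
    · intro i him h0
      have hi : i = pvIdx (n + 1).toNat destination := by
        by_contra h
        rw [hv0other i h him] at h0; omega
      subst hi
      rw [hv0dest]
      have hcnt : 0 < pvCntSet ((List.replicate (n + 1).toNat (-1 : Int)).set
          (pvIdx (n + 1).toNat destination) 0) := by
        unfold pvCntSet
        rw [List.countP_pos_iff]
        have hlt : pvIdx (n + 1).toNat destination
            < ((List.replicate (n + 1).toNat (-1 : Int)).set
                (pvIdx (n + 1).toNat destination) 0).length := by omega
        refine ⟨_, List.getElem_mem hlt, ?_⟩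
        rw [← pvGetD_eq_getElem hlt, hv0dest]
        simp
      omega
  have hpot0 : pvPot (n + 1).toNat ((List.replicate (n + 1).toNat (-1 : Int)).set
      (pvIdx (n + 1).toNat destination) 0) < (n + 1).toNat * (n + 1).toNat + 1 := by
    have hps := pvPot_set (n + 1).toNat (List.replicate (n + 1).toNat (-1 : Int))
      (pvIdx (n + 1).toNat destination) 0 (by simpa using hdI)
    rw [pvPot_replicate, pvRepl_getD _ _ hdI] at hps
    have h1 : pvPotC (n + 1).toNat (-1) = (n + 1).toNat := by unfold pvPotC; rw [if_pos (by omega)]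
    have h2 : pvPotC (n + 1).toNat 0 = 0 := by unfold pvPotC; rw [if_neg (by omega)]; rfl
    rw [h1, h2] at hps
    omega
  have consB := pvBF_fix (n + 1).toNat (pvIdx (n + 1).toNat destination) roads hidx
    ((n + 1).toNat * (n + 1).toNat + 1) _ hBI0 hpot0
  have heq : pvBfsA (pvBuildAdj n roads) (n.toNat + 2) [destination]
        ((List.replicate (n + 1).toNat (-1 : Int)).set (pvIdx (n + 1).toNat destination) 0)
      = pvBF roads ((n + 1).toNat * (n + 1).toNat + 1)
        ((List.replicate (n + 1).toNat (-1 : Int)).set (pvIdx (n + 1).toNat destination) 0) := by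
    rw [hAB]
    exact pvCons_unique (n + 1).toNat (pvIdx (n + 1).toNat destination) roads _ _ hEsub consA consB
  rw [heq]
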